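-- pv_equiv track=rewrite | github.com/Shaurya-L/Data-Structures-and-Algorithms-in-Python | Find pairs with difference k.py | number_count
-- ===== SOURCE A (Python) =====
-- def number_count(a,b,lst):
--     c1=0
--     c2=0
--     for i in lst:
--         if i==a:
--             c1+=1
--         elif i==b:
--             c2+=1
--     return c1,c2
-- ===== SOURCE B (Python) =====
-- def number_count(a, b, lst):
--     # Two library scans instead of one manual loop; when a == b the
--     # original elif never counts b, so the second component is 0.
--     return lst.count(a), (0 if a == b else lst.count(b))
-- ===== Notes on version B (the rewrite author's own statement) =====
-- stated objective: idiomatic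
-- what changed: Replaces the single manual counting loop with two list.count library scans, with the second count suppressed to 0 when a == b to mirror the elif.
import Mathlib
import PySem

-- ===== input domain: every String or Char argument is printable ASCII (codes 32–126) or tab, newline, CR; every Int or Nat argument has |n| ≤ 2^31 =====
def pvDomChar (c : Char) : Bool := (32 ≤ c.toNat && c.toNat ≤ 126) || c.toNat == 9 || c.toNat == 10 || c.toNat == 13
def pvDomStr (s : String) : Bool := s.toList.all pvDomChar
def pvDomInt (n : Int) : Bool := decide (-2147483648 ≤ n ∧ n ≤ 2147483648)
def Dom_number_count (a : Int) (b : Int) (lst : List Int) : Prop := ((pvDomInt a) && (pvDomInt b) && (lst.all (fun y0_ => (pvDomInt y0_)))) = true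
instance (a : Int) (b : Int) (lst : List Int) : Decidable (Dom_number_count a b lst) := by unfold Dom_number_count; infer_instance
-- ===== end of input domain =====

-- B replaces A's single manual counting loop by two library count scans (objective: idiomatic).

-- ===== PORT A =====
-- literal transliteration: one fold over lst carrying (c1, c2), branch order as in Python
def number_count (a : Int) (b : Int) (lst : List Int) : Int × Int :=
  lst.foldl (fun (c : Int × Int) i =>
    if i = a then (c.1 + 1, c.2)
    else if i = b then (c.1, c.2 + 1)
    else c) (0, 0)

-- ===== PORT B =====
def number_count_alt (a : Int) (b : Int) (lst : List Int) : Int × Int :=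
  (PySem.List.count lst a, if a = b then 0 else PySem.List.count lst b)

-- ===== PRECONDITION & SPEC =====
def Spec_number_count (a : Int) (b : Int) (lst : List Int) (out : Int × Int) : Prop := out = number_count_alt a b lst
instance (a : Int) (b : Int) (lst : List Int) (out : Int × Int) : Decidable (Spec_number_count a b lst out) := by unfold Spec_number_count; infer_instance

-- ===== CLAIM (what is proved, stated in full; the proofs are below) =====
def Claim_equal_number_count : Prop := ∀ (a : Int) (b : Int) (lst : List Int), Dom_number_count a b lst → Spec_number_count a b lst (number_count a b lst)

-- ===== LEMMAS AND PROOFS =====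
lemma number_count_fold (a b : Int) (lst : List Int) (c1 c2 : Int) :
    lst.foldl (fun (c : Int × Int) i =>
      if i = a then (c.1 + 1, c.2)
      else if i = b then (c.1, c.2 + 1)
      else c) (c1, c2)
    = (c1 + PySem.List.count lst a,
       c2 + (if a = b then 0 else PySem.List.count lst b)) := by
  induction lst generalizing c1 c2 with
  | nil => simp [PySem.List.count]
  | cons x xs ih =>
    simp only [List.foldl_cons]
    by_cases hxa : x = a
    · rw [if_pos hxa, ih]
      by_cases hab : a = b <;>
        simp [PySem.List.count, List.count_cons, hxa, hab] <;> omega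
    · rw [if_neg hxa]
      by_cases hxb : x = b
      · rw [if_pos hxb, ih]
        have hab : ¬ a = b := fun h => hxa (h ▸ hxb)
        simp [PySem.List.count, List.count_cons, hab, hxa, hxb]
        omega
      · rw [if_neg hxb, ih]
        simp [PySem.List.count, List.count_cons, hxa, hxb]

-- ===== VERDICT (by name: the statement is the Claim_ definition above) =====
theorem number_count_spec : Claim_equal_number_count := by
  intro a b lst _
  show number_count a b lst = number_count_alt a b lst
  unfold number_count number_count_alt
  rw [number_count_fold]
  simp
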